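-- pv_equiv track=rewrite | github.com/pavelyurlov/Finite-Fields | program2.py | irreduciblePol
-- ===== SOURCE A (Python) =====
-- def intToPolynom(num, p, n):
--     myArray = [0 for i in range(n)]
--     for i in range(n):
--         myArray[n - 1 - i] = (num % p)
--         num = (num // p)
--     return myArray
--
-- def value(pol, x, p):
--     n = len(pol)
--     result = (x**n) % p
--     for i in range(n):
--         result += (pol[n - 1 - i] * x**i) % p
--     result %= p
--     return result
--
-- def irreduciblePol(p, n):
--     for num in range(p**n):
--         pol = intToPolynom(num, p, n)
--         count = 0
--         for x in range(p):
--             if value(pol, x, p) > 0: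
--                 count += 1
--                 if count == p:
--                     result = [1 for j in range(n+1)]
--                     for j in range(n):
--                         result[j+1] = pol[j]
--                     return result
-- ===== SOURCE B (Python) =====
-- def _noRoot(pol, p):
--     # True iff the monic polynomial x^len(pol) + pol[0]*x^(len-1) + ... has no root mod p,
--     # evaluated by Horner keeping values reduced mod p (no big-integer powers).
--     for x in range(p):
--         r = 1
--         for c in pol:
--             r = (r * x + c) % p
--         if r == 0:
--             return False
--     return True
--
-- def irreduciblePol(p, n):
--     if p < 2:
--         return None
--     pol = [0] * n
--     for _ in range(p ** n):
--         if _noRoot(pol, p):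
--             return [1] + pol
--         # advance pol like a base-p odometer (most-significant digit first)
--         i = n - 1
--         while i >= 0:
--             pol[i] += 1
--             if pol[i] < p:
--                 break
--             pol[i] = 0
--             i -= 1
--     return None
-- ===== Notes on version B (the rewrite author's own statement) =====
-- stated objective: faster
-- what changed: Replaces the scan that decodes each integer 0..p^n-1 into a digit list and evaluates it with big-integer powers x**i reduced termwise by a base-p odometer that advances the coefficient list in place (same lexicographic order, early p<2 exit) and evaluates each candidate by modular Horner with values kept reduced mod p; intended as faster, and a timing run measured B 7x-116x faster at every size where both implementations finished (on some huge-search-space inputs both time out).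
import Mathlib
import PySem

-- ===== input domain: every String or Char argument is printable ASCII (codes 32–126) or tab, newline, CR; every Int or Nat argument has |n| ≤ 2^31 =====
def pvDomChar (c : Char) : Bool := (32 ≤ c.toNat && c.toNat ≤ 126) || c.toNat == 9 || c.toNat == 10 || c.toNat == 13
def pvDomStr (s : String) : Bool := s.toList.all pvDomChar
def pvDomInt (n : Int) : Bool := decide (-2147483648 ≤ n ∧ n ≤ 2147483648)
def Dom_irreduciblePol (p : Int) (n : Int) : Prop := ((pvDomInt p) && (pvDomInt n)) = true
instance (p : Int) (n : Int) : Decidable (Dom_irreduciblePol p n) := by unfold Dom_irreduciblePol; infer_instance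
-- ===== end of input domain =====

-- B replaces A's scan over the integers 0..p^n-1 (digit-decoding each and evaluating with
-- big-integer powers) by a base-p odometer over the coefficient list itself, in the same
-- order, evaluating each candidate by modular Horner. Objective: faster — intended as faster;
-- a timing run measured B 7x-116x faster on the generated inputs on which both finished
-- (on some huge search spaces, e.g. n = 1 with very large p, both exceed the time budget).

-- ===== PORT A =====
def intToPolynom (num : Int) (p : Int) (n : Int) : List Int :=
  let myArray : List Int := (PySem.List.pyRange 0 n 1).map (fun _ => 0)
  -- the assigned index n-1-i is always in range (0 ≤ i < n), so pySetD is exact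
  let st := (PySem.List.pyRange 0 n 1).foldl
    (fun (st : List Int × Int) i =>
      (PySem.List.pySetD st.1 (n - 1 - i) (PySem.Int.mod st.2 p),
       PySem.Int.floordiv st.2 p)) (myArray, num)
  st.1

def value (pol : List Int) (x : Int) (p : Int) : Int :=
  let n : Int := PySem.List.len pol
  -- x**n and x**i with n = len(pol) ≥ 0 and 0 ≤ i < n: the Nat exponent is exact
  let result := PySem.Int.mod (x ^ n.toNat) p
  let result := (PySem.List.pyRange 0 n 1).foldl
    (fun r i => r + PySem.Int.mod (PySem.List.pyGetD pol (n - 1 - i) 0 * x ^ i.toNat) p) result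
  PySem.Int.mod result p

def mkResult (pol : List Int) (n : Int) : List Int :=
  let result : List Int := (PySem.List.pyRange 0 (n + 1) 1).map (fun _ => 1)
  -- the assigned index j+1 is always in range (0 ≤ j < n), so pySetD/pyGetD are exact
  (PySem.List.pyRange 0 n 1).foldl
    (fun res j => PySem.List.pySetD res (j + 1) (PySem.List.pyGetD pol j 0)) result

def innerLoop (pol : List Int) (p : Int) (n : Int) : List Int → Int → Option (List Int)
  | [], _ => none
  | x :: xs, count =>
    if value pol x p > 0 then
      if count + 1 == p then some (mkResult pol n)
      else innerLoop pol p n xs (count + 1)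
    else innerLoop pol p n xs count

-- 'for num in range(p**n)': the range is consumed lazily (a remaining-count and the
-- current num), exactly the numbers 0, 1, ..., p**n - 1 in order, with early return
def outerLoop (p : Int) (n : Int) : Nat → Int → Option (List Int)
  | 0, _ => none
  | left + 1, num =>
    match innerLoop (intToPolynom num p n) p n (PySem.List.pyRange 0 p 1) 0 with
    | some r => some r
    | none => outerLoop p n left (num + 1)

def irreduciblePol (p : Int) (n : Int) : Option (List Int) :=
  -- p**n: exact for n ≥ 0 (Pre_ excludes n < 0, where the Python raises)
  outerLoop p n (p ^ n.toNat).toNat 0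

-- ===== PORT B =====
def noRoot (pol : List Int) (p : Int) : Bool :=
  (PySem.List.pyRange 0 p 1).all (fun x =>
    pol.foldl (fun r c => PySem.Int.mod (r * x + c) p) 1 != 0)

-- the in-place odometer advance: Source B's 'while i >= 0' scans the digits from the end,
-- so it is transcribed as recursion over the reversed digit list
def advance (p : Int) : List Int → List Int
  | [] => []
  | d :: rest => if d + 1 < p then (d + 1) :: rest else 0 :: advance p rest

def bNext (p : Int) (pol : List Int) : List Int := (advance p pol.reverse).reverse

-- 'for _ in range(p**n)': counted loop, consumed lazily
def bLoop (p : Int) : Nat → List Int → Option (List Int)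
  | 0, _ => none
  | left + 1, pol =>
    if noRoot pol p then some (1 :: pol)
    else bLoop p left (bNext p pol)

def irreduciblePol_alt (p : Int) (n : Int) : Option (List Int) :=
  if p < 2 then none
  else bLoop p (p ^ n.toNat).toNat (List.replicate n.toNat 0)

-- ===== PRECONDITION & SPEC =====
-- Pre_ excludes exactly n < 0, where the Python A raises (p**n is a float there,
-- so range() raises TypeError, and 0**n raises ZeroDivisionError).
def Pre_irreduciblePol (p : Int) (n : Int) : Prop := 0 ≤ n
instance (p : Int) (n : Int) : Decidable (Pre_irreduciblePol p n) := by unfold Pre_irreduciblePol; infer_instance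
def pvWitness_irreduciblePol : Int × Int := (2, 2)

def Spec_irreduciblePol (p : Int) (n : Int) (out : Option (List Int)) : Prop := out = irreduciblePol_alt p n
instance (p : Int) (n : Int) (out : Option (List Int)) : Decidable (Spec_irreduciblePol p n out) := by unfold Spec_irreduciblePol; infer_instance

-- ===== CLAIM (what is proved, stated in full; the proofs are below) =====
def Claim_equal_irreduciblePol : Prop := ∀ (p : Int) (n : Int), Dom_irreduciblePol p n → Pre_irreduciblePol p n → Spec_irreduciblePol p n (irreduciblePol p n)

-- ===== LEMMAS AND PROOFS =====

-- A's digit-filling loop computed recursively: low digit appended last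
def digitsRec (p : Int) : Int → Nat → List Int
  | _, 0 => []
  | num, k + 1 => digitsRec p (PySem.Int.floordiv num p) k ++ [PySem.Int.mod num p]

theorem length_digitsRec (p num : Int) (k : Nat) : (digitsRec p num k).length = k := by
  induction k generalizing num with
  | zero => rfl
  | succ k ih => simp [digitsRec, ih]

-- the tail of A's filling loop (i = 1..k) acts on the first k cells like the loop for size k
theorem fold_shift (p : Int) (k : Nat) :
    ∀ (l : List Nat), (∀ j ∈ l, j < k) → ∀ (arr : List Int) (c m : Int), arr.length = k →
    l.foldl (fun (st : List Int × Int) (j : Nat) =>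
        (PySem.List.pySetD st.1 (((k:Int) + 1) - 1 - ((1:Int) + j)) (PySem.Int.mod st.2 p),
         PySem.Int.floordiv st.2 p)) (arr ++ [c], m)
      = (let r := l.foldl (fun (st : List Int × Int) (j : Nat) =>
            (PySem.List.pySetD st.1 ((k:Int) - 1 - ((0:Int) + j)) (PySem.Int.mod st.2 p),
             PySem.Int.floordiv st.2 p)) (arr, m);
         (r.1 ++ [c], r.2)) := by
  intro l
  induction l with
  | nil => intro _ arr c m _; rfl
  | cons j t ih =>
    intro hb arr c m hlen
    have hj : j < k := hb j (List.mem_cons_self ..)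
    have h1 : ((k:Int) + 1) - 1 - ((1:Int) + j) = ((k - 1 - j : Nat) : Int) := by omega
    have h2 : ((k:Int)) - 1 - ((0:Int) + j) = ((k - 1 - j : Nat) : Int) := by omega
    simp only [List.foldl_cons, h1, h2, PySem.List.pySetD_natCast]
    rw [List.set_append_left _ _ (by omega)]
    exact ih (fun x hx => hb x (List.mem_cons_of_mem _ hx)) _ c _ (by simp [hlen])

theorem itp_eq (p : Int) (k : Nat) (num : Int) :
    intToPolynom num p (k : Int) = digitsRec p num k := by
  induction k generalizing num with
  | zero => simp [intToPolynom, digitsRec, PySem.List.pyRange_one_eq_nil]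
  | succ k ih =>
    unfold intToPolynom
    have hcast : ((k + 1 : Nat) : Int) = (k : Int) + 1 := by push_cast; ring
    rw [hcast]
    rw [PySem.List.pyRange_one_cons (by positivity)]
    simp only [List.foldl_cons, List.map_cons, List.map_const', PySem.List.length_pyRange_one]
    have hidx : ((k:Int) + 1 - 1 - 0) = ((k : Nat) : Int) := by omega
    rw [hidx, PySem.List.pySetD_natCast]
    have harr : (0 :: List.replicate (((k:Int) + 1 - (0+1)).toNat) (0:Int)).set k (PySem.Int.mod num p)
        = List.replicate k 0 ++ [PySem.Int.mod num p] := by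
      have h : (((k:Int) + 1) - (0+1)).toNat = k := by omega
      rw [h, ← List.replicate_succ, List.replicate_succ', List.set_append]
      simp
    rw [harr, show ((0:Int)+1) = 1 from rfl, PySem.List.pyRange_one 1]
    have hlen : ((k:Int) + 1 - 1).toNat = k := by omega
    rw [hlen, List.foldl_map]
    have hfs := fold_shift p k (List.range k) (by simp) (List.replicate k (0:Int))
      (PySem.Int.mod num p) (PySem.Int.floordiv num p) (by simp)
    rw [hfs]
    rw [digitsRec, ← ih (PySem.Int.floordiv num p)]
    unfold intToPolynom
    simp [PySem.List.pyRange_one, List.foldl_map]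
    simp [Function.comp_def, List.map_const']

theorem sum_mod (p : Int) (l : List Int) : ((l.map (fun t => t % p)).sum) % p = l.sum % p := by
  induction l with
  | nil => rfl
  | cons t ts ih =>
    simp only [List.map_cons, List.sum_cons]
    rw [Int.add_emod, Int.emod_emod, ← Int.add_emod, Int.add_emod t, ih, ← Int.add_emod]

theorem mod_absorb (a x c p : Int) : (a % p * x + c) % p = (a * x + c) % p := by
  conv_lhs => rw [Int.add_emod, Int.mul_emod, Int.emod_emod]
  rw [← Int.mul_emod, ← Int.add_emod]

-- B's modular Horner equals the pure Horner reduced mod p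
theorem hornerM_eq (p x : Int) (hp : 1 < p) (pol : List Int) :
    pol.foldl (fun r c => PySem.Int.mod (r * x + c) p) 1
      = (pol.foldl (fun r c => r * x + c) 1) % p := by
  have key : ∀ (l : List Int) (a : Int),
      l.foldl (fun r c => PySem.Int.mod (r * x + c) p) (a % p)
        = (l.foldl (fun r c => r * x + c) a) % p := by
    intro l
    induction l with
    | nil => intro a; rfl
    | cons c cs ih =>
      intro a
      simp only [List.foldl_cons]
      rw [PySem.Int.mod_eq_emod_of_pos (by omega), mod_absorb, ← ih (a * x + c)]
  have h1 : (1 : Int) % p = 1 := Int.emod_eq_of_lt (by omega) (by omega)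
  calc pol.foldl (fun r c => PySem.Int.mod (r * x + c) p) 1
      = pol.foldl (fun r c => PySem.Int.mod (r * x + c) p) (1 % p) := by rw [h1]
    _ = _ := key pol 1

-- normal form of A's value
theorem val_norm (pol : List Int) (x p : Int) (hp : 0 < p) :
    value pol x p
      = (x ^ pol.length +
          ((List.range pol.length).map
            (fun j => pol.getD (pol.length - 1 - j) 0 * x ^ j)).sum) % p := by
  unfold value
  simp only [PySem.List.len_eq]
  rw [PySem.List.foldl_add, PySem.List.pyRange_one, List.map_map]
  have hT : ((pol.length : Int) - 0).toNat = pol.length := by omega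
  rw [hT]
  simp only [Function.comp_def, zero_add, Int.toNat_natCast]
  rw [List.map_congr_left (g := fun j => (pol.getD (pol.length - 1 - j) 0 * x ^ j) % p)
    (by
      intro j hj
      have hj' : j < pol.length := List.mem_range.1 hj
      have hcast : ((pol.length:Int) - 1 - (j:Int)) = ((pol.length - 1 - j : Nat) : Int) := by omega
      rw [hcast, PySem.List.pyGetD_natCast, PySem.Int.mod_eq_emod_of_pos hp])]
  rw [PySem.Int.mod_eq_emod_of_pos hp, PySem.Int.mod_eq_emod_of_pos hp]
  have hs := sum_mod p ((List.range pol.length).map (fun j => pol.getD (pol.length - 1 - j) 0 * x ^ j))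
  rw [List.map_map] at hs
  simp only [Function.comp_def] at hs
  rw [Int.add_emod, Int.emod_emod, hs, ← Int.add_emod]

theorem horner_pure (x : Int) (pol : List Int) :
    pol.foldl (fun r c => r * x + c) 1
      = x ^ pol.length +
        ((List.range pol.length).map (fun j => pol.getD (pol.length - 1 - j) 0 * x ^ j)).sum := by
  induction pol using List.reverseRecOn with
  | nil => simp
  | append_singleton cs c ih =>
    rw [List.foldl_append, List.foldl_cons, List.foldl_nil, ih]
    have hlen : (cs ++ [c]).length = cs.length + 1 := by simp
    rw [hlen, List.range_succ_eq_map, List.map_cons, List.sum_cons, List.map_map]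
    have h0 : (cs ++ [c]).getD (cs.length + 1 - 1 - 0) 0 * x ^ 0 = c := by simp
    rw [h0]
    have hterm : (List.range cs.length).map
          ((fun j => (cs ++ [c]).getD (cs.length + 1 - 1 - j) 0 * x ^ j) ∘ Nat.succ)
        = (List.range cs.length).map (fun j => (cs.getD (cs.length - 1 - j) 0 * x ^ j) * x) := by
      apply List.map_congr_left
      intro j hj
      have hj' : j < cs.length := List.mem_range.1 hj
      simp only [Function.comp_apply]
      have hidx : cs.length + 1 - 1 - (j + 1) = cs.length - 1 - j := by omega
      have hidx2 : cs.length - 1 - j < cs.length := by omega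
      rw [show Nat.succ j = j + 1 from rfl, hidx,
        List.getD_eq_getElem _ _ (by simp; omega), List.getElem_append_left hidx2,
        ← List.getD_eq_getElem _ _ hidx2]
      ring
    rw [hterm, List.sum_map_mul_right]
    ring

-- A's value is B's modular Horner evaluation
theorem value_eq (pol : List Int) (x p : Int) (hp : 1 < p) :
    value pol x p = pol.foldl (fun r c => PySem.Int.mod (r * x + c) p) 1 := by
  rw [val_norm pol x p (by omega), hornerM_eq p x hp, horner_pure]

theorem value_nonneg (pol : List Int) (x p : Int) (hp : 0 < p) : 0 ≤ value pol x p :=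
  PySem.Int.mod_nonneg _ hp

theorem mkResult_eq (pol : List Int) (k : Nat) (hl : pol.length = k) :
    mkResult pol (k : Int) = 1 :: pol := by
  unfold mkResult
  rw [PySem.List.pyRange_one 0 ((k:Int)+1), List.map_const', List.length_map, List.length_range,
    PySem.List.pyRange_one 0 (k:Int), List.foldl_map]
  have h1 : (((k:Int) + 1) - 0).toNat = k + 1 := by omega
  have h2 : ((k:Int) - 0).toNat = k := by omega
  rw [h1, h2]
  have key : ∀ m, m ≤ k →
      (List.range m).foldl
        (fun (res : List Int) (j : Nat) => PySem.List.pySetD res ((0:Int) + (j:Int) + 1) (PySem.List.pyGetD pol ((0:Int) + (j:Int)) 0))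
        (List.replicate (k+1) 1)
      = 1 :: (pol.take m ++ List.replicate (k - m) 1) := by
    intro m
    induction m with
    | zero => intro _; simp [List.replicate_succ]
    | succ m ih =>
      intro hm
      rw [List.range_succ, List.foldl_append, List.foldl_cons, List.foldl_nil, ih (by omega)]
      have hc1 : ((0:Int) + (m:Int) + 1) = ((m+1 : Nat) : Int) := by push_cast; ring
      have hc2 : ((0:Int) + (m:Int)) = ((m : Nat) : Int) := by omega
      rw [hc1, hc2, PySem.List.pySetD_natCast, PySem.List.pyGetD_natCast]
      have hmk : m < k := by omega
      have htake : (pol.take m).length = m := by rw [List.length_take]; omega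
      rw [List.set_cons_succ, List.set_append]
      rw [if_neg (by omega)]
      rw [htake, Nat.sub_self]
      have hrep : List.replicate (k - m) (1:Int) = 1 :: List.replicate (k - m - 1) 1 := by
        rw [← List.replicate_succ]; congr 1; omega
      rw [hrep, List.set_cons_zero]
      rw [List.getD_eq_getElem _ _ (by omega)]
      have hrep2 : k - m - 1 = k - (m + 1) := by omega
      rw [hrep2]
      simp
      rw [← List.take_concat_get' pol m (by omega), List.append_assoc]
      simp
  have := key k (le_refl k)
  rw [this, Nat.sub_self, List.take_of_length_le (by omega)]
  simp

theorem inner_none (pol : List Int) (p n : Int) :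
    ∀ (l : List Int) (t : Int), t + l.length < p → innerLoop pol p n l t = none := by
  intro l
  induction l with
  | nil => intro t _; rfl
  | cons x xs ih =>
    intro t ht
    simp only [List.length_cons] at ht
    unfold innerLoop
    split
    · rw [if_neg (by simp; push_cast at ht ⊢; omega)]
      exact ih (t+1) (by push_cast at ht ⊢; omega)
    · exact ih t (by push_cast at ht ⊢; omega)

theorem inner_main (pol : List Int) (p n : Int) :
    ∀ (l : List Int) (t : Int), t + l.length = p → t < p →
    innerLoop pol p n l t
      = if l.all (fun x => decide (value pol x p > 0)) then some (mkResult pol n) else none := by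
  intro l
  induction l with
  | nil => intro t h1 h2; simp at h1; omega
  | cons x xs ih =>
    intro t h1 h2
    simp only [List.length_cons] at h1
    unfold innerLoop
    by_cases hv : value pol x p > 0
    · rw [if_pos hv]
      by_cases hxs : xs = []
      · subst hxs
        simp at h1
        rw [if_pos (by simp; omega)]
        simp [hv]
      · have hlen : (0:Int) < xs.length := by
          have := List.length_pos_iff.2 hxs
          exact_mod_cast this
        rw [if_neg (by simp; push_cast at h1 ⊢; omega)]
        rw [ih (t+1) (by push_cast at h1 ⊢; omega) (by push_cast at h1 ⊢; omega)]
        simp [hv]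
    · rw [if_neg hv]
      rw [inner_none pol p n xs t (by push_cast at h1 ⊢; omega)]
      simp [hv]

-- A's inner loop decides exactly B's no-root test
theorem inner_full (pol : List Int) (p n : Int) (hp : 2 ≤ p) :
    innerLoop pol p n (PySem.List.pyRange 0 p 1) 0
      = if noRoot pol p then some (mkResult pol n) else none := by
  rw [inner_main pol p n (PySem.List.pyRange 0 p 1) 0
    (by rw [PySem.List.length_pyRange_one]; omega) (by omega)]
  congr 1
  unfold noRoot
  congr 1
  congr 1
  funext x
  rw [← value_eq pol x p (by omega)]
  have h0 := value_nonneg pol x p (by omega)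
  by_cases h : value pol x p = 0
  · simp [h]
  · have hpos : 0 < value pol x p := lt_of_le_of_ne h0 (Ne.symm h)
    simp [h, hpos]

theorem outer_findSome (p n : Int) :
    ∀ (N : Nat) (num : Int),
    outerLoop p n N num
      = (PySem.List.pyRange num (num + (N : Int)) 1).findSome? (fun num =>
          innerLoop (intToPolynom num p n) p n (PySem.List.pyRange 0 p 1) 0) := by
  intro N
  induction N with
  | zero =>
    intro num
    have h : PySem.List.pyRange num (num + ((0:Nat):Int)) 1 = [] :=
      PySem.List.pyRange_one_eq_nil (by omega)
    rw [h]
    rfl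
  | succ N ih =>
    intro num
    have h : PySem.List.pyRange num (num + ((N+1:Nat):Int)) 1
        = num :: PySem.List.pyRange (num+1) (num + ((N+1:Nat):Int)) 1 :=
      PySem.List.pyRange_one_cons (by push_cast; omega)
    rw [h, List.findSome?_cons]
    cases h : innerLoop (intToPolynom num p n) p n (PySem.List.pyRange 0 p 1) 0 with
    | some r => simp [outerLoop, h]
    | none =>
      simp only [outerLoop, h, ih (num + 1)]
      rw [show num + (((N+1:Nat)):Int) = num + 1 + ((N:Nat):Int) from by push_cast; ring]

theorem findSome?_congr_mem {α β : Type} (l : List α) (f g : α → Option β)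
    (h : ∀ a ∈ l, f a = g a) : l.findSome? f = l.findSome? g := by
  induction l with
  | nil => rfl
  | cons x xs ih =>
    rw [List.findSome?_cons, List.findSome?_cons, h x (List.mem_cons_self ..),
      ih (fun a ha => h a (List.mem_cons_of_mem _ ha))]

theorem emod_unique (num p q r : Int) (h : num = p * q + r) (h0 : 0 ≤ r) (h1 : r < p) :
    num % p = r := by
  subst h; rw [add_comm, Int.add_mul_emod_self_left]; exact Int.emod_eq_of_lt h0 h1

theorem ediv_unique (num p q r : Int) (h : num = p * q + r) (h0 : 0 ≤ r) (h1 : r < p) :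
    num / p = q := by
  subst h
  rw [add_comm, Int.add_mul_ediv_left _ _ (by omega : p ≠ 0), Int.ediv_eq_zero_of_lt h0 h1]
  omega

theorem digits_zero (p : Int) (hp : 0 < p) (k : Nat) :
    digitsRec p 0 k = List.replicate k 0 := by
  induction k with
  | zero => rfl
  | succ k ih =>
    show digitsRec p (PySem.Int.floordiv 0 p) k ++ [PySem.Int.mod 0 p] = _
    rw [PySem.Int.floordiv_eq_ediv_of_pos hp, PySem.Int.mod_eq_emod_of_pos hp,
      Int.zero_ediv, Int.zero_emod, ih, List.replicate_succ']

theorem advance_cons (p d : Int) (rest : List Int) :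
    advance p (d :: rest) = if d + 1 < p then (d + 1) :: rest else 0 :: advance p rest := rfl

-- the odometer advance carries the digit list of num to the digit list of num + 1
theorem advance_digits (p : Int) (hp : 2 ≤ p) :
    ∀ (k : Nat) (num : Int), 0 ≤ num → num + 1 < p ^ k →
    advance p ((digitsRec p num k).reverse) = (digitsRec p (num + 1) k).reverse := by
  intro k
  induction k with
  | zero =>
    intro num h0 h1
    simp at h1
    omega
  | succ k ih =>
    intro num h0 h1
    have hq0 : 0 ≤ num / p := Int.ediv_nonneg h0 (by omega)
    have hr0 : 0 ≤ num % p := Int.emod_nonneg num (by omega)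
    have hrp : num % p < p := Int.emod_lt_of_pos num (by omega)
    have hnum : num = p * (num / p) + num % p := by
      have := Int.mul_ediv_add_emod num p
      omega
    have hunf : ∀ (m : Int), digitsRec p m (k+1)
        = digitsRec p (m / p) k ++ [m % p] := by
      intro m
      show digitsRec p (PySem.Int.floordiv m p) k ++ [PySem.Int.mod m p] = _
      rw [PySem.Int.floordiv_eq_ediv_of_pos (by omega), PySem.Int.mod_eq_emod_of_pos (by omega)]
    rw [hunf num, hunf (num + 1), List.reverse_append, List.reverse_append]
    simp only [List.reverse_cons, List.reverse_nil, List.nil_append, List.singleton_append]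
    show advance p (num % p :: (digitsRec p (num / p) k).reverse) = _
    by_cases hc : num % p + 1 < p
    · have hdiv : (num + 1) / p = num / p :=
        ediv_unique (num+1) p (num/p) (num%p+1) (by omega) (by omega) (by omega)
      have hmod : (num + 1) % p = num % p + 1 :=
        emod_unique (num+1) p (num/p) (num%p+1) (by omega) (by omega) (by omega)
      rw [advance_cons, if_pos hc, hdiv, hmod]
    · have hr : num % p = p - 1 := by omega
      have hn1 : num + 1 = p * (num / p + 1) := by rw [mul_add, mul_one]; omega
      have hdiv : (num + 1) / p = num / p + 1 := by
        rw [hn1, Int.mul_ediv_cancel_left _ (by omega : p ≠ 0)]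
      have hmod : (num + 1) % p = 0 := by
        rw [hn1, Int.mul_emod_right]
      have hlt : num / p + 1 < p ^ k := by
        have hpk : num + 1 < p * p ^ k := by
          rw [show p * p ^ k = p ^ (k+1) from by rw [pow_succ]; ring]
          exact h1
        nlinarith [hn1, hpk]
      rw [advance_cons, if_neg hc, ih (num / p) hq0 hlt, hdiv, hmod]

-- the counted odometer loop is a findSome? over the remaining numbers, in order
theorem bLoop_eq (p : Int) (hp : 2 ≤ p) (k : Nat) :
    ∀ (N : Nat) (num : Int), 0 ≤ num → num + (N : Int) = p ^ k →
    bLoop p N (digitsRec p num k)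
      = (PySem.List.pyRange num (p ^ k) 1).findSome? (fun m =>
          if noRoot (digitsRec p m k) p then some (1 :: digitsRec p m k) else none) := by
  intro N
  induction N with
  | zero =>
    intro num h0 hsum
    rw [PySem.List.pyRange_one_eq_nil (by omega)]
    rfl
  | succ N ih =>
    intro num h0 hsum
    have hlt : num < p ^ k := by push_cast at hsum; omega
    rw [PySem.List.pyRange_one_cons hlt, List.findSome?_cons]
    show (if noRoot (digitsRec p num k) p then some (1 :: digitsRec p num k)
        else bLoop p N (bNext p (digitsRec p num k))) = _
    by_cases hnr : noRoot (digitsRec p num k) p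
    · rw [if_pos hnr, if_pos hnr]
    · rw [if_neg hnr, if_neg hnr]
      cases N with
      | zero =>
        rw [PySem.List.pyRange_one_eq_nil (by push_cast at hsum; omega)]
        rfl
      | succ N' =>
        rw [show bNext p (digitsRec p num k)
            = (advance p ((digitsRec p num k).reverse)).reverse from rfl]
        rw [advance_digits p hp k num h0 (by push_cast at hsum; omega), List.reverse_reverse]
        exact ih (num + 1) (by omega) (by push_cast at hsum ⊢; omega)

-- for p < 2 the inner loop can never return (empty x-range, or value ≡ 0 mod 1)
theorem inner_small (pol : List Int) (p n : Int) (hp : p < 2) :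
    innerLoop pol p n (PySem.List.pyRange 0 p 1) 0 = none := by
  by_cases h1 : p ≤ 0
  · rw [PySem.List.pyRange_one_eq_nil h1]
    rfl
  · have hp1 : p = 1 := by omega
    subst hp1
    rw [show PySem.List.pyRange 0 (1:Int) 1 = [0] from by decide]
    unfold innerLoop
    rw [if_neg (by
      unfold value
      rw [PySem.Int.mod_eq_emod_of_pos (by omega), Int.emod_one]
      omega)]
    rfl

theorem main_equiv (p n : Int) (hn : 0 ≤ n) : irreduciblePol p n = irreduciblePol_alt p n := by
  by_cases hp : p < 2
  · unfold irreduciblePol irreduciblePol_alt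
    rw [if_pos hp, outer_findSome]
    rw [List.findSome?_eq_none_iff]
    intro num _
    exact inner_small _ p n hp
  · have hp2 : 2 ≤ p := by omega
    unfold irreduciblePol irreduciblePol_alt
    rw [if_neg hp, outer_findSome]
    have hn' : ((n.toNat : Nat) : Int) = n := by omega
    have hcast : (0:Int) + (((p ^ n.toNat).toNat : Nat) : Int) = p ^ n.toNat := by
      have hpos : (0:Int) ≤ p ^ n.toNat := by positivity
      omega
    rw [hcast]
    rw [show bLoop p (p ^ n.toNat).toNat (List.replicate n.toNat 0)
        = bLoop p (p ^ n.toNat).toNat (digitsRec p 0 n.toNat) from by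
      rw [digits_zero p (by omega) n.toNat]]
    rw [bLoop_eq p hp2 n.toNat (p ^ n.toNat).toNat 0 (le_refl 0) (by
      have hpos : (0:Int) ≤ p ^ n.toNat := by positivity
      omega)]
    apply findSome?_congr_mem
    intro num _
    rw [show intToPolynom num p n = intToPolynom num p ((n.toNat : Nat) : Int) from by rw [hn'],
      itp_eq p n.toNat num]
    rw [inner_full _ p n hp2]
    have hlen : (digitsRec p num n.toNat).length = n.toNat := length_digitsRec p num n.toNat
    rw [show mkResult (digitsRec p num n.toNat) n
        = mkResult (digitsRec p num n.toNat) ((n.toNat : Nat) : Int) from by rw [hn'],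
      mkResult_eq _ n.toNat hlen]

-- ===== VERDICT (by name: the statement is the Claim_ definition above) =====
theorem irreduciblePol_spec : Claim_equal_irreduciblePol := by
  intro p n _ hpre
  unfold Spec_irreduciblePol
  exact main_equiv p n hpre
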